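-- pv_equiv track=rewrite | github.com/kakaq7/mlbb-rank-estimator | app.py | calculate_total_stars
-- ===== SOURCE A (Python) =====
-- rank_bintang_default = {
--     "Warrior": 3,
--     "Elite": 4,
--     "Master": 4,
--     "Grandmaster": 5,
--     "Epic": 5,
--     "Legend": 5,
--     "Mythic": 0
-- }
--
-- def get_rank_base(rank_name):
--     if rank_name == "Mythic":
--         return (6, 0)
--     rank_parts = rank_name.split()
--     rank = rank_parts[0]
--     roman = rank_parts[1]
--     roman_map = {"I": 1, "II": 2, "III": 3, "IV": 4, "V": 5}
--     div = roman_map[roman]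
--     rank_index = ["Warrior", "Elite", "Master", "Grandmaster", "Epic", "Legend"].index(rank)
--     return (rank_index, div)
--
-- def calculate_total_stars(start_name, start_star, end_name, end_star):
--     if start_name == end_name:
--         return max(0, end_star - start_star)
--
--     start_rank, start_div = get_rank_base(start_name)
--     end_rank, end_div = get_rank_base(end_name)
--
--     total = 0
--     for r in range(start_rank, end_rank + 1):
--         rank_name = ["Warrior", "Elite", "Master", "Grandmaster", "Epic", "Legend", "Mythic"][r]
--         bintang_per_div = rank_bintang_default[rank_name]
--
--         div_start = start_div if r == start_rank else 5
--         div_end = end_div if r == end_rank else 1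
--
--         for d in range(div_start, div_end - 1, -1):
--             if r == start_rank and d == start_div:
--                 if r == end_rank and d == end_div:
--                     total += max(0, (bintang_per_div - start_star) + end_star)
--                 else:
--                     total += bintang_per_div - start_star
--             elif r == end_rank and d == end_div:
--                 total += end_star
--             else:
--                 total += bintang_per_div
--
--     return total
-- ===== SOURCE B (Python) =====
-- # Precomputed cumulative-star table: _PREFIX[name] = total stars from Warrior V (0 stars)
-- # up to that rank/division at 0 stars.  Mythic sits above Legend I.
-- _PREFIX = {
--     "Warrior V": 0, "Warrior IV": 3, "Warrior III": 6, "Warrior II": 9, "Warrior I": 12,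
--     "Elite V": 15, "Elite IV": 19, "Elite III": 23, "Elite II": 27, "Elite I": 31,
--     "Master V": 35, "Master IV": 39, "Master III": 43, "Master II": 47, "Master I": 51,
--     "Grandmaster V": 55, "Grandmaster IV": 60, "Grandmaster III": 65, "Grandmaster II": 70, "Grandmaster I": 75,
--     "Epic V": 80, "Epic IV": 85, "Epic III": 90, "Epic II": 95, "Epic I": 100,
--     "Legend V": 105, "Legend IV": 110, "Legend III": 115, "Legend II": 120, "Legend I": 125,
--     "Mythic": 130,
-- }
--
-- def calculate_total_stars(start_name, start_star, end_name, end_star):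
--     if start_name == end_name:
--         return max(0, end_star - start_star)
--     s = _PREFIX[start_name]
--     e = _PREFIX[end_name]
--     if e <= s:
--         return 0
--     return (e + end_star) - (s + start_star)
-- ===== Notes on version B (the rewrite author's own statement) =====
-- stated objective: simpler
-- what changed: Replaces A's rank-name parsing plus nested per-rank/per-division counting loops by a precomputed cumulative-star table keyed by rank name: the cross-rank result is a single unclamped difference of two table lookups, 0 when the end rank is not strictly above the start.
-- outside the precondition, e.g. on calculate_total_stars('Warrior  I', 0, 'Elite I', 0): A returns 19, B raises KeyError
import Mathlib
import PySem

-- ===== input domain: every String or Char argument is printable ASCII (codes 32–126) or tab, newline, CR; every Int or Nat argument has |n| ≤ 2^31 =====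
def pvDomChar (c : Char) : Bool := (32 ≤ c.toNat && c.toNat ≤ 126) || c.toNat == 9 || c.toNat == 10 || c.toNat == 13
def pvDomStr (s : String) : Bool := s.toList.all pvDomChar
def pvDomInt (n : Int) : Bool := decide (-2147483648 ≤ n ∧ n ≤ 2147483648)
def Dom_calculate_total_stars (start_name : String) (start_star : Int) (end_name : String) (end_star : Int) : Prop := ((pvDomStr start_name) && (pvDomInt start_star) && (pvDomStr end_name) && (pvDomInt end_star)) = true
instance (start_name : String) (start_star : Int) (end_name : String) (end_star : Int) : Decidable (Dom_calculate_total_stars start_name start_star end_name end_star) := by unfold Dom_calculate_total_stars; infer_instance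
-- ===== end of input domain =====

-- B replaces A's rank-parsing and nested star-counting loops by a precomputed cumulative-star
-- table and a single subtraction (objective: simpler; same-name branch unchanged, cross-rank
-- branch is an unclamped difference, 0 when the end rank is not strictly above the start).

-- ===== PORT A =====
def rankBintangDefault : PySem.Dict String Int :=
  PySem.Dict.ofList [("Warrior",3),("Elite",4),("Master",4),("Grandmaster",5),("Epic",5),("Legend",5),("Mythic",0)]

def get_rank_base (rank_name : String) : Option (Int × Int) :=
  if rank_name = "Mythic" then some (6, 0)
  else
    let rank_parts := PySem.Str.split₀ rank_name
    match PySem.List.pyGet? rank_parts 0, PySem.List.pyGet? rank_parts 1 with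
    | some rank, some roman =>
      let roman_map : PySem.Dict String Int := PySem.Dict.ofList [("I",1),("II",2),("III",3),("IV",4),("V",5)]
      match roman_map.get? roman, PySem.List.index? ["Warrior","Elite","Master","Grandmaster","Epic","Legend"] rank with
      | some div, some rank_index => some ((rank_index : Int), div)
      | _, _ => none
    | _, _ => none

def calculate_total_stars (start_name : String) (start_star : Int) (end_name : String) (end_star : Int) : Int :=
  if start_name = end_name then max 0 (end_star - start_star)
  else
    match get_rank_base start_name, get_rank_base end_name with
    | some (start_rank, start_div), some (end_rank, end_div) =>
      (PySem.List.pyRange start_rank (end_rank + 1) 1).foldl (fun total r =>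
        let rank_name := PySem.List.pyGetD ["Warrior","Elite","Master","Grandmaster","Epic","Legend","Mythic"] r ""
        let bintang_per_div := rankBintangDefault.getD rank_name 0
        let div_start := if r = start_rank then start_div else 5
        let div_end := if r = end_rank then end_div else 1
        (PySem.List.pyRange div_start (div_end - 1) (-1)).foldl (fun t d =>
          if r = start_rank ∧ d = start_div then
            (if r = end_rank ∧ d = end_div then t + max 0 ((bintang_per_div - start_star) + end_star)
             else t + (bintang_per_div - start_star))
          else if r = end_rank ∧ d = end_div then t + end_star
          else t + bintang_per_div) total) 0
    | _, _ => 0   -- unreachable under Pre_ (here Python raises KeyError/IndexError/ValueError)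

-- ===== PORT B =====
def pvPrefixTable : PySem.Dict String Int :=
  PySem.Dict.ofList [("Warrior V", 0), ("Warrior IV", 3), ("Warrior III", 6), ("Warrior II", 9), ("Warrior I", 12),
    ("Elite V", 15), ("Elite IV", 19), ("Elite III", 23), ("Elite II", 27), ("Elite I", 31),
    ("Master V", 35), ("Master IV", 39), ("Master III", 43), ("Master II", 47), ("Master I", 51),
    ("Grandmaster V", 55), ("Grandmaster IV", 60), ("Grandmaster III", 65), ("Grandmaster II", 70), ("Grandmaster I", 75),
    ("Epic V", 80), ("Epic IV", 85), ("Epic III", 90), ("Epic II", 95), ("Epic I", 100),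
    ("Legend V", 105), ("Legend IV", 110), ("Legend III", 115), ("Legend II", 120), ("Legend I", 125),
    ("Mythic", 130)]

def calculate_total_stars_alt (start_name : String) (start_star : Int) (end_name : String) (end_star : Int) : Int :=
  if start_name = end_name then max 0 (end_star - start_star)
  else
    match pvPrefixTable.get? start_name, pvPrefixTable.get? end_name with
    | some s, some e => if e ≤ s then 0 else (e + end_star) - (s + start_star)
    | _, _ => 0   -- unreachable under Pre_ (here Python raises KeyError)

-- ===== PRECONDITION & SPEC =====
def pvCanon : List String :=
  ["Warrior V", "Warrior IV", "Warrior III", "Warrior II", "Warrior I",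
   "Elite V", "Elite IV", "Elite III", "Elite II", "Elite I",
   "Master V", "Master IV", "Master III", "Master II", "Master I",
   "Grandmaster V", "Grandmaster IV", "Grandmaster III", "Grandmaster II", "Grandmaster I",
   "Epic V", "Epic IV", "Epic III", "Epic II", "Epic I",
   "Legend V", "Legend IV", "Legend III", "Legend II", "Legend I",
   "Mythic"]

-- Pre_ admits equal-name pairs (any strings: A returns without parsing) and pairs of canonical
-- rank names.  It excludes distinct non-canonical names (on most A raises; on oddly spaced
-- variants like "Warrior  I", which A's split() still parses, B's table lookup raises KeyError).
def Pre_calculate_total_stars (start_name : String) (start_star : Int) (end_name : String) (end_star : Int) : Prop :=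
  start_name = end_name ∨ (start_name ∈ pvCanon ∧ end_name ∈ pvCanon)
instance (start_name : String) (start_star : Int) (end_name : String) (end_star : Int) : Decidable (Pre_calculate_total_stars start_name start_star end_name end_star) := by unfold Pre_calculate_total_stars; infer_instance

def pvWitness_calculate_total_stars : String × Int × String × Int := ("Warrior V", 2, "Mythic", 0)

def Spec_calculate_total_stars (start_name : String) (start_star : Int) (end_name : String) (end_star : Int) (out : Int) : Prop := out = calculate_total_stars_alt start_name start_star end_name end_star
instance (start_name : String) (start_star : Int) (end_name : String) (end_star : Int) (out : Int) : Decidable (Spec_calculate_total_stars start_name start_star end_name end_star out) := by unfold Spec_calculate_total_stars; infer_instance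

-- ===== CLAIM (what is proved, stated in full; the proofs are below) =====
def Claim_equal_calculate_total_stars : Prop := ∀ (start_name : String) (start_star : Int) (end_name : String) (end_star : Int), Dom_calculate_total_stars start_name start_star end_name end_star → Pre_calculate_total_stars start_name start_star end_name end_star → Spec_calculate_total_stars start_name start_star end_name end_star (calculate_total_stars start_name start_star end_name end_star)

-- ===== LEMMAS AND PROOFS =====

-- stars per division of rank index r (Mythic = 6 has none)
def bintangOf (r : Int) : Int :=
  if r = 0 then 3 else if r = 1 then 4 else if r = 2 then 4 else if r = 3 then 5
  else if r = 4 then 5 else if r = 5 then 5 else 0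

-- total stars in all divisions of ranks strictly below rank index r
def cumOf (r : Int) : Int :=
  if r ≤ 0 then 0 else if r = 1 then 15 else if r = 2 then 35 else if r = 3 then 55
  else if r = 4 then 80 else if r = 5 then 105 else 130

-- cumulative stars below position (r, d)
def pvalOf (r d : Int) : Int := cumOf r + (5 - d) * bintangOf r

def pvBaseTable : PySem.Dict String (Int × Int) :=
  PySem.Dict.ofList [("Warrior V",(0,5)), ("Warrior IV",(0,4)), ("Warrior III",(0,3)), ("Warrior II",(0,2)), ("Warrior I",(0,1)),
    ("Elite V",(1,5)), ("Elite IV",(1,4)), ("Elite III",(1,3)), ("Elite II",(1,2)), ("Elite I",(1,1)),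
    ("Master V",(2,5)), ("Master IV",(2,4)), ("Master III",(2,3)), ("Master II",(2,2)), ("Master I",(2,1)),
    ("Grandmaster V",(3,5)), ("Grandmaster IV",(3,4)), ("Grandmaster III",(3,3)), ("Grandmaster II",(3,2)), ("Grandmaster I",(3,1)),
    ("Epic V",(4,5)), ("Epic IV",(4,4)), ("Epic III",(4,3)), ("Epic II",(4,2)), ("Epic I",(4,1)),
    ("Legend V",(5,5)), ("Legend IV",(5,4)), ("Legend III",(5,3)), ("Legend II",(5,2)), ("Legend I",(5,1)),
    ("Mythic",(6,0))]

def baseOf (n : String) : Int × Int := pvBaseTable.getD n (0, 0)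

def ValidB (r d : Int) : Prop := (0 ≤ r ∧ r ≤ 5 ∧ 1 ≤ d ∧ d ≤ 5) ∨ (r = 6 ∧ d = 0)

lemma canon_base : ∀ n ∈ pvCanon, get_rank_base n = some (baseOf n) := by decide

lemma canon_table : ∀ n ∈ pvCanon, pvPrefixTable.get? n = some (pvalOf (baseOf n).1 (baseOf n).2) := by decide

lemma canon_valid : ∀ n ∈ pvCanon, ValidB (baseOf n).1 (baseOf n).2 := by
  simp only [ValidB]; decide

set_option maxRecDepth 8192 in
lemma canon_nodup : (pvCanon.map baseOf).Nodup := by decide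

lemma bint_eval : ∀ r : Int, 0 ≤ r → r ≤ 6 →
    rankBintangDefault.getD (PySem.List.pyGetD ["Warrior","Elite","Master","Grandmaster","Epic","Legend","Mythic"] r "") 0 = bintangOf r := by
  intro r h1 h2; interval_cases r <;> decide

lemma cum_step : ∀ r : Int, 0 ≤ r → r ≤ 5 → cumOf (r + 1) = cumOf r + 5 * bintangOf r := by
  intro r h1 h2; interval_cases r <;> decide

lemma pval_lt (sr sd er ed : Int) (hv1 : ValidB sr sd) (hv2 : ValidB er ed)
    (h : sr < er ∨ (sr = er ∧ ed < sd)) : pvalOf sr sd < pvalOf er ed := by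
  rcases hv1 with ⟨h1, h2, h3, h4⟩ | ⟨h1, h2⟩ <;> rcases hv2 with ⟨g1, g2, g3, g4⟩ | ⟨g1, g2⟩
  · rcases h with h | ⟨he, hd⟩
    · interval_cases sr <;> interval_cases er <;> simp [pvalOf, cumOf, bintangOf] <;> omega
    · subst he; interval_cases sr <;> simp [pvalOf, cumOf, bintangOf] <;> omega
  · subst g1; subst g2; interval_cases sr <;> simp [pvalOf, cumOf, bintangOf] <;> omega
  · rcases h with h | ⟨he, hd⟩ <;> omega
  · rcases h with h | ⟨he, hd⟩ <;> omega

-- the inner-loop body of A's port, with the bintang lookup replaced by bintangOf (proof-side name)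
def pvG (sr sd er ed ss es : Int) : Int → Int → Int := fun total r =>
  (PySem.List.pyRange (if r = sr then sd else 5) ((if r = er then ed else 1) - 1) (-1)).foldl
    (fun t d =>
      if r = sr ∧ d = sd then
        (if r = er ∧ d = ed then t + max 0 ((bintangOf r - ss) + es) else t + (bintangOf r - ss))
      else if r = er ∧ d = ed then t + es
      else t + bintangOf r) total

lemma fold_const (b t a c : Int) (hc : c ≤ a) :
    (PySem.List.pyRange a c (-1)).foldl (fun t _ => t + b) t = t + (a - c) * b := by
  show List.foldl (fun acc x => acc + (fun _ : Int => b) x) t (PySem.List.pyRange a c (-1)) = _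
  rw [PySem.List.foldl_add]
  rw [PySem.List.sum_map_const_int]
  rw [PySem.List.length_pyRange_neg_one]
  rw [Int.toNat_of_nonneg (by omega : (0:Int) ≤ a - c)]

lemma range_split_last (a e : Int) (h : e ≤ a) :
    PySem.List.pyRange a (e - 1) (-1) = PySem.List.pyRange a e (-1) ++ [e] := by
  rw [PySem.List.pyRange_neg_one_eq_reverse]
  rw [show e - 1 + 1 = e by ring]
  rw [PySem.List.pyRange_one_cons (by omega : e < a + 1)]
  rw [List.reverse_cons]
  rw [← PySem.List.pyRange_neg_one_eq_reverse]

lemma fold_first (b ss t sd : Int) (h1 : 1 ≤ sd) :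
    (PySem.List.pyRange sd 0 (-1)).foldl (fun t d => if d = sd then t + (b - ss) else t + b) t
      = t + sd * b - ss := by
  rw [PySem.List.pyRange_neg_one_cons (by omega : (0:Int) < sd)]
  simp only [List.foldl_cons, if_true]
  rw [PySem.List.foldl_congr_mem (g := fun t _ => t + b) (h := by intro acc d hd; have hb := PySem.List.mem_pyRange_neg_one.1 hd; rw [if_neg (by omega)])]
  rw [fold_const b _ _ _ (by omega)]
  ring

lemma fold_last (b es t ed : Int) (h1 : 0 ≤ ed) (h2 : ed ≤ 5) :
    (PySem.List.pyRange 5 (ed - 1) (-1)).foldl (fun t d => if d = ed then t + es else t + b) t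
      = t + (5 - ed) * b + es := by
  rw [range_split_last 5 ed (by omega)]
  rw [List.foldl_append]
  simp only [List.foldl_cons, List.foldl_nil, if_true]
  rw [PySem.List.foldl_congr_mem (g := fun t _ => t + b) (h := by intro acc d hd; have hb := PySem.List.mem_pyRange_neg_one.1 hd; rw [if_neg (by omega)])]
  rw [fold_const b _ _ _ (by omega)]

lemma fold_same (b ss es x t sd ed : Int) (h1 : 1 ≤ ed) (h2 : ed < sd) (h3 : sd ≤ 5) :
    (PySem.List.pyRange sd (ed - 1) (-1)).foldl
      (fun t d => if d = sd then (if d = ed then t + x else t + (b - ss))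
                  else if d = ed then t + es else t + b) t
      = t + (b - ss) + (sd - 1 - ed) * b + es := by
  rw [PySem.List.pyRange_neg_one_cons (by omega : ed - 1 < sd)]
  rw [range_split_last (sd - 1) ed (by omega)]
  simp only [List.foldl_cons, List.foldl_nil, List.foldl_append, if_true,
    if_neg (by omega : ¬ sd = ed), if_neg (by omega : ¬ ed = sd)]
  rw [PySem.List.foldl_congr_mem (g := fun t _ => t + b) (h := by intro acc d hd; have hb := PySem.List.mem_pyRange_neg_one.1 hd; rw [if_neg (by omega), if_neg (by omega)])]
  rw [fold_const b _ _ _ (by omega)]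

lemma mid_sum : ∀ (n : Nat) (a t : Int), 0 ≤ a → a + n ≤ 6 →
    (PySem.List.pyRange a (a + n) 1).foldl (fun t r => t + 5 * bintangOf r) t
      = t + (cumOf (a + n) - cumOf a) := by
  intro n
  induction n with
  | zero =>
    intro a t h1 h2
    rw [show a + ((0:Nat):Int) = a by push_cast; ring]
    rw [PySem.List.pyRange_one_eq_nil le_rfl]
    simp
  | succ n ih =>
    intro a t h1 h2
    rw [show a + ((n+1:Nat):Int) = (a + (n:Int)) + 1 by push_cast; ring]
    rw [PySem.List.pyRange_one_succ_right (by omega)]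
    rw [List.foldl_append]
    rw [ih a t h1 (by omega)]
    simp only [List.foldl_cons, List.foldl_nil]
    rw [cum_step (a + (n:Int)) (by omega) (by omega)]
    ring

lemma core (sr sd er ed ss es : Int) (hv1 : ValidB sr sd) (hv2 : ValidB er ed)
    (hne : ¬(sr = er ∧ sd = ed)) :
    (PySem.List.pyRange sr (er + 1) 1).foldl (pvG sr sd er ed ss es) 0
      = if pvalOf er ed ≤ pvalOf sr sd then 0 else (pvalOf er ed + es) - (pvalOf sr sd + ss) := by
  rcases lt_trichotomy sr er with hlt | heq | hgt
  · -- sr < er : end rank strictly above start rank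
    have hsr5 : 0 ≤ sr ∧ sr ≤ 5 ∧ 1 ≤ sd ∧ sd ≤ 5 := by
      rcases hv1 with h | h
      · exact h
      · rcases hv2 with g | g <;> omega
    have her : (0 ≤ er ∧ er ≤ 6 ∧ 0 ≤ ed ∧ ed ≤ 5) := by
      rcases hv2 with g | g <;> omega
    have hdec : PySem.List.pyRange sr (er + 1) 1
        = [sr] ++ PySem.List.pyRange (sr + 1) er 1 ++ [er] := by
      rw [PySem.List.pyRange_one_append sr (sr + 1) (er + 1) (by omega) (by omega)]
      rw [PySem.List.pyRange_one_append (sr + 1) er (er + 1) (by omega) (by omega)]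
      rw [PySem.List.pyRange_one_singleton, PySem.List.pyRange_one_singleton]
      rw [List.append_assoc]
    have e1 : ([sr] : List Int).foldl (pvG sr sd er ed ss es) 0 = sd * bintangOf sr - ss := by
      simp only [List.foldl_cons, List.foldl_nil, pvG]
      simp only [if_true, true_and,
        eq_false (show ¬ sr = er by omega), false_and, if_false]
      rw [show ((1:Int) - 1) = 0 by ring]
      rw [fold_first (bintangOf sr) ss 0 sd (by omega)]
      ring
    have e2 : ∀ t : Int, (PySem.List.pyRange (sr + 1) er 1).foldl (pvG sr sd er ed ss es) t
        = t + (cumOf er - cumOf (sr + 1)) := by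
      intro t
      rw [PySem.List.foldl_congr_mem (g := fun t r => t + 5 * bintangOf r) (h := by intro acc r hr; have hb := PySem.List.mem_pyRange_one.1 hr; simp only [pvG, eq_false (show ¬ r = sr by omega), eq_false (show ¬ r = er by omega), false_and, if_false]; rw [show ((1:Int) - 1) = 0 by ring]; rw [fold_const (bintangOf r) acc 5 0 (by omega)]; ring)]
      have hn : (sr + 1) + ((er - (sr + 1)).toNat : Int) = er := by omega
      rw [← hn]
      rw [mid_sum (er - (sr + 1)).toNat (sr + 1) t (by omega) (by omega)]
    have e3 : ∀ t : Int, ([er] : List Int).foldl (pvG sr sd er ed ss es) t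
        = t + (5 - ed) * bintangOf er + es := by
      intro t
      simp only [List.foldl_cons, List.foldl_nil, pvG]
      simp only [if_true, true_and,
        eq_false (show ¬ er = sr by omega), false_and, if_false]
      rw [fold_last (bintangOf er) es t ed (by omega) (by omega)]
    rw [hdec, List.foldl_append, List.foldl_append, e1, e2, e3]
    rw [if_neg (not_le.2 (pval_lt sr sd er ed hv1 hv2 (Or.inl hlt)))]
    simp only [pvalOf]
    rw [show cumOf er = cumOf (sr + 1) + (cumOf er - cumOf (sr + 1)) by ring]
    rw [cum_step sr (by omega) (by omega)]
    ring
  · -- sr = er : same rank, different division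
    subst heq
    have hsd : 0 ≤ sr ∧ sr ≤ 5 ∧ 1 ≤ sd ∧ sd ≤ 5 ∧ 1 ≤ ed ∧ ed ≤ 5 ∧ sd ≠ ed := by
      rcases hv1 with h | h <;> rcases hv2 with g | g <;> omega
    rw [PySem.List.pyRange_one_singleton]
    simp only [List.foldl_cons, List.foldl_nil, pvG]
    simp only [if_true, true_and]
    rcases lt_or_gt_of_ne (show ed ≠ sd by omega) with hdlt | hdgt
    · -- ed < sd : end division strictly above
      rw [fold_same (bintangOf sr) ss es _ 0 sd ed (by omega) hdlt (by omega)]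
      rw [if_neg (not_le.2 (pval_lt sr sd sr ed hv1 hv2 (Or.inr ⟨rfl, hdlt⟩)))]
      simp only [pvalOf]
      ring
    · -- sd < ed : end division below start, loop empty
      rw [PySem.List.pyRange_neg_one_eq_nil (by omega : sd ≤ ed - 1)]
      rw [if_pos (le_of_lt (pval_lt sr ed sr sd hv2 hv1 (Or.inr ⟨rfl, hdgt⟩)))]
      simp
  · -- er < sr : end not above start, outer loop empty
    rw [PySem.List.pyRange_one_eq_nil (by omega)]
    rw [if_pos (le_of_lt (pval_lt er ed sr sd hv2 hv1 (Or.inl hgt)))]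
    simp

lemma base_inj {m n : String} (hm : m ∈ pvCanon) (hn : n ∈ pvCanon)
    (h : baseOf m = baseOf n) : m = n := by
  have := List.inj_on_of_nodup_map canon_nodup
  exact this hm hn h


lemma main_cross (sn en : String) (ss es : Int) (hs : sn ∈ pvCanon) (he : en ∈ pvCanon)
    (hne : sn ≠ en) :
    calculate_total_stars sn ss en es = calculate_total_stars_alt sn ss en es := by
  rcases hsb : baseOf sn with ⟨sr, sd⟩
  rcases heb : baseOf en with ⟨er, ed⟩
  have h1 : get_rank_base sn = some (sr, sd) := by rw [canon_base sn hs, hsb]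
  have h2 : get_rank_base en = some (er, ed) := by rw [canon_base en he, heb]
  have t1 : pvPrefixTable.get? sn = some (pvalOf sr sd) := by
    have h := canon_table sn hs; rw [hsb] at h; exact h
  have t2 : pvPrefixTable.get? en = some (pvalOf er ed) := by
    have h := canon_table en he; rw [heb] at h; exact h
  have hv1 : ValidB sr sd := by have h := canon_valid sn hs; rw [hsb] at h; exact h
  have hv2 : ValidB er ed := by have h := canon_valid en he; rw [heb] at h; exact h
  have hbne : ¬(sr = er ∧ sd = ed) := by
    rintro ⟨ha, hb⟩
    exact hne (base_inj hs he (by rw [hsb, heb, ha, hb]))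
  simp only [calculate_total_stars, calculate_total_stars_alt, if_neg hne, h1, h2, t1, t2]
  have hb6 : 0 ≤ sr ∧ er ≤ 6 := by rcases hv1 with h | h <;> rcases hv2 with g | g <;> omega
  rw [PySem.List.foldl_congr_mem (g := pvG sr sd er ed ss es) (h := by intro acc r hr; have hb := PySem.List.mem_pyRange_one.1 hr; simp only [pvG, bint_eval r (by omega) (by omega)])]
  exact core sr sd er ed ss es hv1 hv2 hbne

-- ===== VERDICT (by name: the statement is the Claim_ definition above) =====
theorem calculate_total_stars_spec : Claim_equal_calculate_total_stars := by
  intro sn ss en es _ hpre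
  unfold Spec_calculate_total_stars
  by_cases heq : sn = en
  · subst heq
    unfold calculate_total_stars calculate_total_stars_alt
    rw [if_pos rfl, if_pos rfl]
  · rcases hpre with h | ⟨hs, he⟩
    · exact absurd h heq
    · exact main_cross sn en ss es hs he heq
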